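-- pv_equiv track=rewrite | github.com/kaluginpeter/Algorithms_and_structures_tasks | CodeWars/6kyu/Sharkovsky_s_Theorem.py | sharkovsky
-- ===== SOURCE A (Python) =====
-- def is_power_two(x):
--     return x != 0 and (x & (x - 1)) == 0
--
-- def sharkovsky(a, b):
--     if a == b: return False
--     a_power = is_power_two(a)
--     b_power = is_power_two(b)
--     if not a_power and not b_power:
--         exp_a = 0
--         temp_a = a
--         while temp_a % 2 == 0:
--             temp_a //= 2
--             exp_a += 1
--         exp_b = 0
--         temp_b = b
--         while temp_b % 2 == 0:
--             temp_b //= 2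
--             exp_b += 1
--         if exp_a < exp_b: return True
--         elif exp_a > exp_b: return False
--         return temp_a < temp_b
--     elif a_power and b_power:return a > b
--     if not a_power:return True
--     return False
-- ===== SOURCE B (Python) =====
-- def is_power_two(x):
--     return x != 0 and (x & (x - 1)) == 0
--
-- def halve_race(a, b):
--     # both non-powers of two: halve both simultaneously until one goes odd;
--     # the one still even has the larger 2-adic valuation, ties compare odd parts
--     if a % 2 == 0 and b % 2 == 0:
--         return halve_race(a // 2, b // 2)
--     if a % 2 == 0:
--         return False
--     if b % 2 == 0:
--         return True
--     return a < b
--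
-- def sharkovsky(a, b):
--     if a == b:
--         return False
--     pa, pb = is_power_two(a), is_power_two(b)
--     if pa != pb:
--         return pb
--     if pa:
--         return a > b
--     return halve_race(a, b)
-- ===== Notes on version B (the rewrite author's own statement) =====
-- stated objective: alternative
-- what changed: Replaced A's two independent 2-adic-valuation counting loops plus a three-way exponent comparison by a single simultaneous recursive descent halve_race(a,b) that halves both numbers together and never computes a valuation; Pre_ excludes the inputs (one argument 0 next to a non-power of two) on which A's while loop never terminates.
import Mathlib
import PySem

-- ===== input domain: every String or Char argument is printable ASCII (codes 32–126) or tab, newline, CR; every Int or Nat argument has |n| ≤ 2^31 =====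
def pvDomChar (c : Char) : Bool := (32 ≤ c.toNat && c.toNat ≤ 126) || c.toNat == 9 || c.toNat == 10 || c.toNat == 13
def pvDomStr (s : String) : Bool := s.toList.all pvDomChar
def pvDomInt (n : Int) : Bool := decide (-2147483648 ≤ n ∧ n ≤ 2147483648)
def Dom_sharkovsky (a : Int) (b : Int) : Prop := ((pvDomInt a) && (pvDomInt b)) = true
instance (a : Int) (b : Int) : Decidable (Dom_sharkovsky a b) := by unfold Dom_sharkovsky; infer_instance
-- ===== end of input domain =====

-- B replaces A's two separate 2-adic valuation counting loops and explicit exponent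
-- comparison by one simultaneous recursive descent that halves both arguments together
-- (objective: alternative). Pre_ excludes the inputs on which Python A's while loop
-- never terminates (0 paired with a different non-power of two).


-- termination helpers: halving an even int shrinks |·| (strictly when nonzero)
theorem pvHalveLt (t : Int) (h : ¬t = 0 ∧ PySem.Int.mod t 2 = 0) :
    (PySem.Int.floordiv t 2).natAbs < t.natAbs := by
  obtain ⟨hne, hmod⟩ := h
  obtain ⟨k, hk⟩ := (PySem.Int.mod_eq_zero_iff_dvd t 2).mp hmod
  rw [PySem.Int.floordiv_eq_ediv_of_pos (by omega), hk, Int.mul_ediv_cancel_left _ (by omega)]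
  omega

theorem pvHalveLe (t : Int) (h : PySem.Int.mod t 2 = 0) :
    (PySem.Int.floordiv t 2).natAbs ≤ t.natAbs := by
  obtain ⟨k, hk⟩ := (PySem.Int.mod_eq_zero_iff_dvd t 2).mp h
  rw [PySem.Int.floordiv_eq_ediv_of_pos (by omega), hk, Int.mul_ediv_cancel_left _ (by omega)]
  omega

-- ===== PORT A =====
def is_power_two_A (x : Int) : Bool := x != 0 && PySem.Int.band x (x - 1) == 0

-- A's while loop: 'while temp % 2 == 0: temp //= 2; exp += 1' (the t ≠ 0 guard only makes
-- the recursion total; Pre_ excludes the inputs on which the Python loop never exits)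
def loopA (t : Int) (e : Int) : Int × Int :=
  if h : ¬t = 0 ∧ PySem.Int.mod t 2 = 0 then loopA (PySem.Int.floordiv t 2) (e + 1) else (e, t)
  termination_by t.natAbs
  decreasing_by exact pvHalveLt t h

def sharkovsky (a : Int) (b : Int) : Bool :=
  if a == b then false
  else
    let a_power := is_power_two_A a
    let b_power := is_power_two_A b
    if !a_power && !b_power then
      let (exp_a, temp_a) := loopA a 0
      let (exp_b, temp_b) := loopA b 0
      if exp_a < exp_b then true
      else if exp_a > exp_b then false
      else decide (temp_a < temp_b)
    else if a_power && b_power then decide (a > b)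
    else if !a_power then true
    else false

-- ===== PORT B =====
def is_power_two_B (x : Int) : Bool := x != 0 && PySem.Int.band x (x - 1) == 0

-- Source B's halve_race: halve both simultaneously until one goes odd. The ¬(a = 0 ∧ b = 0)
-- conjunct only makes the recursion total (Python B diverges at (0,0), which sharkovsky_alt
-- never reaches); on every other input the branch order is exactly Source B's.
def halveRace (a : Int) (b : Int) : Bool :=
  if h : (PySem.Int.mod a 2 = 0 ∧ PySem.Int.mod b 2 = 0) ∧ ¬(a = 0 ∧ b = 0) then
    halveRace (PySem.Int.floordiv a 2) (PySem.Int.floordiv b 2)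
  else if PySem.Int.mod a 2 = 0 then false
  else if PySem.Int.mod b 2 = 0 then true
  else decide (a < b)
  termination_by a.natAbs + b.natAbs
  decreasing_by
    rcases h with ⟨⟨ha, hb⟩, hz⟩
    rcases Classical.em (a = 0) with h0 | h0
    · have hb0 : ¬b = 0 := fun hb0 => hz ⟨h0, hb0⟩
      have := pvHalveLt b ⟨hb0, hb⟩
      have := pvHalveLe a ha
      omega
    · have := pvHalveLt a ⟨h0, ha⟩
      have := pvHalveLe b hb
      omega

def sharkovsky_alt (a : Int) (b : Int) : Bool :=
  if a == b then false
  else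
    let pa := is_power_two_B a
    let pb := is_power_two_B b
    if pa != pb then pb
    else if pa then decide (a > b)
    else halveRace a b

-- ===== PRECONDITION & SPEC =====
-- Pre_ excludes exactly the inputs on which Python A never returns: its valuation while
-- loop runs forever when an argument is 0 and the other is a non-power of two (a ≠ b).
def Pre_sharkovsky (a : Int) (b : Int) : Prop :=
  (a = 0 → b = 0 ∨ (PySem.Int.band b (b - 1) = 0 ∧ b ≠ 0)) ∧
  (b = 0 → a = 0 ∨ (PySem.Int.band a (a - 1) = 0 ∧ a ≠ 0))
instance (a : Int) (b : Int) : Decidable (Pre_sharkovsky a b) := by unfold Pre_sharkovsky; infer_instance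

def pvWitness_sharkovsky : Int × Int := (12, 40)

def Spec_sharkovsky (a : Int) (b : Int) (out : Bool) : Prop := out = sharkovsky_alt a b
instance (a : Int) (b : Int) (out : Bool) : Decidable (Spec_sharkovsky a b out) := by unfold Spec_sharkovsky; infer_instance

-- ===== CLAIM =====
def Claim_equal_sharkovsky : Prop := ∀ (a : Int) (b : Int), Dom_sharkovsky a b → Pre_sharkovsky a b → Spec_sharkovsky a b (sharkovsky a b)

-- ===== LEMMAS AND PROOFS =====
-- loopA unfoldings
theorem loopA_step (t e : Int) (ht : ¬t = 0) (hm : PySem.Int.mod t 2 = 0) :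
    loopA t e = loopA (PySem.Int.floordiv t 2) (e + 1) := by
  rw [loopA, dif_pos ⟨ht, hm⟩]

theorem loopA_stop (t e : Int) (hm : ¬PySem.Int.mod t 2 = 0) : loopA t e = (e, t) := by
  rw [loopA, dif_neg (fun h => hm h.2)]

theorem loopA_fst_ge (t e : Int) : e ≤ (loopA t e).1 := by
  rw [loopA]
  split_ifs with h
  · have := loopA_fst_ge (PySem.Int.floordiv t 2) (e + 1)
    omega
  · simp
  termination_by t.natAbs
  decreasing_by exact pvHalveLt t h

-- the simultaneous descent computes A's three-way comparison of the two valuation loops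
theorem halveRace_eq (a b e : Int) (ha : a ≠ 0) (hb : b ≠ 0) :
    halveRace a b =
      (if (loopA a e).1 < (loopA b e).1 then true
       else if (loopA b e).1 < (loopA a e).1 then false
       else decide ((loopA a e).2 < (loopA b e).2)) := by
  rw [halveRace]
  by_cases hma : PySem.Int.mod a 2 = 0 <;> by_cases hmb : PySem.Int.mod b 2 = 0
  · -- both even: recurse on both
    have ha2 : PySem.Int.floordiv a 2 ≠ 0 := by
      intro h0
      obtain ⟨k, hk⟩ := (PySem.Int.mod_eq_zero_iff_dvd a 2).mp hma
      rw [PySem.Int.floordiv_eq_ediv_of_pos (by omega), hk,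
        Int.mul_ediv_cancel_left _ (by omega)] at h0
      exact ha (by omega)
    have hb2 : PySem.Int.floordiv b 2 ≠ 0 := by
      intro h0
      obtain ⟨k, hk⟩ := (PySem.Int.mod_eq_zero_iff_dvd b 2).mp hmb
      rw [PySem.Int.floordiv_eq_ediv_of_pos (by omega), hk,
        Int.mul_ediv_cancel_left _ (by omega)] at h0
      exact hb (by omega)
    rw [dif_pos ⟨⟨hma, hmb⟩, fun h => ha h.1⟩,
      loopA_step a e ha hma, loopA_step b e hb hmb]
    exact halveRace_eq _ _ (e + 1) ha2 hb2
  · -- a even, b odd: exp_a > exp_b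
    rw [dif_neg (fun h => hmb h.1.2), if_pos hma, loopA_stop b e hmb,
      loopA_step a e ha hma]
    have h1 := loopA_fst_ge (PySem.Int.floordiv a 2) (e + 1)
    rw [if_neg (by omega : ¬(loopA (PySem.Int.floordiv a 2) (e + 1)).1 < (e, b).1),
      if_pos (by omega : (e, b).1 < (loopA (PySem.Int.floordiv a 2) (e + 1)).1)]
  · -- a odd, b even: exp_a < exp_b
    rw [dif_neg (fun h => hma h.1.1), if_neg hma, if_pos hmb, loopA_stop a e hma,
      loopA_step b e hb hmb]
    have h1 := loopA_fst_ge (PySem.Int.floordiv b 2) (e + 1)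
    rw [if_pos (by omega : ((e, a) : Int × Int).1 < (loopA (PySem.Int.floordiv b 2) (e + 1)).1)]
  · -- both odd: equal exponents, compare odd parts
    rw [dif_neg (fun h => hma h.1.1), if_neg hma, if_neg hmb, loopA_stop a e hma,
      loopA_stop b e hmb]
    simp
  termination_by a.natAbs + b.natAbs
  decreasing_by
    have := pvHalveLt a ⟨ha, hma⟩
    have := pvHalveLt b ⟨hb, hmb⟩
    omega

theorem pow_AB (x : Int) : is_power_two_A x = is_power_two_B x := rfl

-- ===== VERDICT =====
theorem sharkovsky_spec : Claim_equal_sharkovsky := by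
  intro a b _ hpre
  unfold Spec_sharkovsky sharkovsky sharkovsky_alt
  by_cases hab : a = b
  · simp [hab]
  · simp only [beq_iff_eq, hab, if_false]
    rw [pow_AB a, pow_AB b]
    cases hpa : is_power_two_B a <;> cases hpb : is_power_two_B b
    · -- both non-powers: Pre_ forces a ≠ 0 and b ≠ 0
      have ha : a ≠ 0 := by
        intro h0
        rcases hpre.1 h0 with h | ⟨hband, hbne⟩
        · exact hab (by omega)
        · simp [is_power_two_B, hbne, hband] at hpb
      have hb : b ≠ 0 := by
        intro h0
        rcases hpre.2 h0 with h | ⟨hband, hane⟩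
        · exact hab (by omega)
        · simp [is_power_two_B, hane, hband] at hpa
      have hr := halveRace_eq a b 0 ha hb
      rcases hA : loopA a 0 with ⟨ea, ta⟩
      rcases hB : loopA b 0 with ⟨eb, tb⟩
      rw [hA, hB] at hr
      simp only [Bool.not_false, Bool.and_self, if_true, bne_self_eq_false,
        Bool.false_eq_true, if_false, hr, gt_iff_lt]
    · simp
    · simp
    · simp
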